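-- pv_equiv track=rewrite | github.com/RZachLamberty/adventofcode | 2016/day7.py | get_abas
-- ===== SOURCE A (Python) =====
-- def get_abas(ips):
--     x = []
--     for ip in ips:
--         for i in range(len(ip) - 2):
--             x0, x1, x2 = ip[i: i + 3]
--             if x0 != x1 and x0 == x2:
--                 x.append(x0 + x1 + x2)
--     return x
-- ===== SOURCE B (Python) =====
-- def get_abas(ips):
--     out = []
--     for ip in ips:
--         # index every character's positions, then test p+2 membership per character
--         pos = {}
--         for i, ch in enumerate(ip):
--             pos.setdefault(ch, []).append(i)
--         hits = []
--         for ch, ps in pos.items():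
--             here = set(ps)
--             for p in ps:
--                 if p + 2 in here and ip[p + 1] != ch:
--                     hits.append(p)
--         hits.sort()
--         for p in hits:
--             out.append(ip[p:p + 3])
--     return out
-- ===== Notes on version B (the rewrite author's own statement) =====
-- stated objective: alternative
-- what changed: Replaces A's sliding 3-char window scan by an inverted index: B groups each string's positions by character in a dict, keeps positions p whose character also occurs at p+2 (set membership) with a different middle character, sorts the hit positions and slices the triples out.
import Mathlib
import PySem

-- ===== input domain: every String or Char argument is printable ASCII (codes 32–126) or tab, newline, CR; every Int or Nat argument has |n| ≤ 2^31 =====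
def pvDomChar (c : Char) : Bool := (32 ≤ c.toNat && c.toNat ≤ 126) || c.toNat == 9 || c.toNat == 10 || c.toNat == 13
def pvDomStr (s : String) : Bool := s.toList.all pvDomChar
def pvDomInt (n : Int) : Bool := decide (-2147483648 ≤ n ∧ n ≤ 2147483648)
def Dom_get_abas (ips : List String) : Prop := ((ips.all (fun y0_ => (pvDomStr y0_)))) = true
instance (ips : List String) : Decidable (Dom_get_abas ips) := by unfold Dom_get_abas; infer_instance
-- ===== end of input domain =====

-- B replaces A's sliding-window scan by an inverted index: positions grouped by character,
-- a membership test for the same character two places on, then a sort of the hit positions.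

-- ===== PORT A =====
-- inner loop body of A: x0, x1, x2 = ip[i:i+3]; if x0 != x1 and x0 == x2: x.append(x0+x1+x2)
def getAbasBodyA (l : List Char) (x : List String) (i : Int) : List String :=
  match PySem.List.slice l (some i) (some (i + 3)) with
  | [x0, x1, x2] => if x0 ≠ x1 ∧ x0 = x2 then x ++ [String.ofList [x0, x1, x2]] else x
  | _ => x   -- unreachable: the slice always has length 3 for i in range(len(ip)-2)

def get_abas (ips : List String) : List String :=
  ips.foldl (fun x ip =>
    (PySem.List.pyRange 0 ((ip.toList.length : Int) - 2) 1).foldl (getAbasBodyA ip.toList) x) []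

-- ===== PORT B =====
-- pos = {}; for i, ch in enumerate(ip): pos.setdefault(ch, []).append(i)
-- for ch, ps in pos.items(): here = set(ps); for p in ps: if p+2 in here and ip[p+1] != ch: hits.append(p)
-- hits.sort(); for p in hits: out.append(ip[p:p+3])
-- (ip[p+1] is ported as pyGet?; the first conjunct guarantees it is in range wherever Python evaluates it)
def get_abas_alt (ips : List String) : List String :=
  ips.foldl (fun out ip =>
    let lc := ip.toList
    let pos := (PySem.List.enumerate lc 0).foldl
      (fun d q => d.modify q.2 [] (· ++ [q.1])) PySem.Dict.empty
    let hits := pos.items.foldl (fun h q =>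
      let here := PySem.Set.ofList q.2
      q.2.foldl (fun h' p =>
        if (p + 2) ∈ here ∧ PySem.List.pyGet? lc (p + 1) ≠ some q.1
        then h' ++ [p] else h') h) []
    let shits := PySem.List.sorted hits (fun x => x) false
    out ++ shits.map (fun p => String.ofList (PySem.List.slice lc (some p) (some (p + 3))))) []

-- ===== PRECONDITION & SPEC =====
def Spec_get_abas (ips : List String) (out : List String) : Prop := out = get_abas_alt ips
instance (ips : List String) (out : List String) : Decidable (Spec_get_abas ips out) := by unfold Spec_get_abas; infer_instance

-- ===== CLAIM (what is proved, stated in full; the proofs are below) =====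
def Claim_equal_get_abas : Prop := ∀ (ips : List String), Dom_get_abas ips → Spec_get_abas ips (get_abas ips)

-- ===== LEMMAS AND PROOFS =====

-- canonical per-string recursion both sides are reduced to
def winsRec : List Char → List String
  | a :: b :: c :: rest =>
      (if a ≠ b ∧ a = c then [String.ofList [a, b, c]] else []) ++ winsRec (b :: c :: rest)
  | _ => []

-- ---------- A side (reduction of the range/slice loop to winsRec) ----------
lemma bodyA_shift (t : List Char) (a : Char) (x : List String) (k : Nat) :
    getAbasBodyA (a :: t) x (1 + (k : Int)) = getAbasBodyA t x (0 + (k : Int)) := by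
  have hs1 : PySem.List.slice (a :: t) (some (1 + (k : Int))) (some (1 + (k : Int) + 3))
      = (t.drop k).take 3 := by
    have h1 : (1 + (k : Int)) = ((k + 1 : Nat) : Int) := by push_cast; ring
    rw [h1]
    have h2 : (((k + 1 : Nat) : Int)) + 3 = ((k + 4 : Nat) : Int) := by push_cast; ring
    rw [h2, PySem.List.slice_natCast]
    have h5 : k + 4 - (k + 1) = 3 := by omega
    rw [h5, List.drop_succ_cons]
  have hs2 : PySem.List.slice t (some (0 + (k : Int))) (some (0 + (k : Int) + 3))
      = (t.drop k).take 3 := by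
    have h3 : (0 + (k : Int)) = ((k : Nat) : Int) := by omega
    rw [h3]
    have h4 : (((k : Nat) : Int)) + 3 = ((k + 3 : Nat) : Int) := by push_cast; ring
    rw [h4, PySem.List.slice_natCast]
    have h5 : k + 3 - k = 3 := by omega
    rw [h5]
  simp only [getAbasBodyA, hs1, hs2]

lemma foldA_shift (t : List Char) (a : Char) (b : Int) (acc : List String) :
    (PySem.List.pyRange 1 b 1).foldl (getAbasBodyA (a :: t)) acc
      = (PySem.List.pyRange 0 (b - 1) 1).foldl (getAbasBodyA t) acc := by
  rw [PySem.List.pyRange_one 1 b, PySem.List.pyRange_one 0 (b - 1)]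
  have : (b - 1 - 0) = (b - 1) := by ring
  rw [this, List.foldl_map, List.foldl_map]
  have hfun : (fun (x : List String) (k : Nat) => getAbasBodyA (a :: t) x (1 + (k : Int)))
      = fun (x : List String) (k : Nat) => getAbasBodyA t x (0 + (k : Int)) := by
    funext x k; exact bodyA_shift t a x k
  rw [hfun]

lemma foldA (l : List Char) (acc : List String) :
    (PySem.List.pyRange 0 ((l.length : Int) - 2) 1).foldl (getAbasBodyA l) acc
      = acc ++ winsRec l := by
  induction l using winsRec.induct generalizing acc with
  | case1 a b c rest ih =>
      have hlen : ((a :: b :: c :: rest).length : Int) - 2 = (rest.length : Int) + 1 := by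
        simp; ring
      rw [hlen, PySem.List.pyRange_one_cons (by omega)]
      simp only [List.foldl_cons]
      have hstep : getAbasBodyA (a :: b :: c :: rest) acc 0
          = acc ++ (if a ≠ b ∧ a = c then [String.ofList [a, b, c]] else []) := by
        simp only [getAbasBodyA]
        have hsl : PySem.List.slice (a :: b :: c :: rest) (some 0) (some (0 + 3)) = [a, b, c] := by
          simp [pysem]
        rw [hsl]
        by_cases h1 : a = b
        · simp [h1]
        · by_cases h2 : a = c
          · subst h2; simp [h1]
          · simp [h1, h2]
      rw [hstep, show ((0 : Int) + 1) = (1 : Int) by norm_num]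
      have hsh := foldA_shift (b :: c :: rest) a ((rest.length : Int) + 1)
        (acc ++ (if a ≠ b ∧ a = c then [String.ofList [a, b, c]] else []))
      have hb : ((rest.length : Int) + 1) - 1 = ((b :: c :: rest).length : Int) - 2 := by
        simp; ring
      rw [hb] at hsh
      rw [hsh, ih, winsRec, List.append_assoc]
  | case2 l hne =>
      have hlen : ((l.length : Int) - 2) ≤ 0 := by
        match l, hne with
        | [], _ => simp
        | [a], _ => simp
        | [a, b], _ => simp
        | a :: b :: c :: rest, h => exact absurd rfl (h a b c rest)
      rw [PySem.List.pyRange_one_eq_nil (by omega)]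
      match l, hne with
      | [], _ => simp [winsRec]
      | [a], _ => simp [winsRec]
      | [a, b], _ => simp [winsRec]
      | a :: b :: c :: rest, h => exact absurd rfl (h a b c rest)

-- ---------- shared canonical form: positions of ABA starts, via enumerate ----------
def goodB (l : List Char) (p : Int) : Bool :=
  match PySem.List.pyGet? l p, PySem.List.pyGet? l (p + 1), PySem.List.pyGet? l (p + 2) with
  | some a, some b, some c => a != b && a == c
  | _, _, _ => false

def wOf (l : List Char) (p : Int) : String :=
  String.ofList (PySem.List.slice l (some p) (some (p + 3)))

lemma enum_shift {α : Type} (t : List α) (s : Int) :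
    PySem.List.enumerate t (s + 1) = (PySem.List.enumerate t s).map (fun q => (q.1 + 1, q.2)) := by
  induction t generalizing s with
  | nil => simp [PySem.List.enumerate_nil]
  | cons x t ih =>
      rw [PySem.List.enumerate_cons, PySem.List.enumerate_cons, List.map_cons, ih (s + 1)]

lemma goodB_shift (a : Char) (t : List Char) (k : Nat) :
    goodB (a :: t) ((k : Int) + 1) = goodB t (k : Int) := by
  have g0 : PySem.List.pyGet? (a :: t) ((k : Int) + 1) = PySem.List.pyGet? t (k : Int) := by
    rw [show ((k : Int) + 1) = ((k + 1 : Nat) : Int) by push_cast; ring,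
      PySem.List.pyGet?_natCast, PySem.List.pyGet?_natCast, List.getElem?_cons_succ]
  have g1 : PySem.List.pyGet? (a :: t) ((k : Int) + 2) = PySem.List.pyGet? t ((k : Int) + 1) := by
    rw [show ((k : Int) + 2) = ((k + 2 : Nat) : Int) by push_cast; ring,
      show ((k : Int) + 1) = ((k + 1 : Nat) : Int) by push_cast; ring,
      PySem.List.pyGet?_natCast, PySem.List.pyGet?_natCast,
      show k + 2 = (k + 1) + 1 from rfl, List.getElem?_cons_succ]
  have g2 : PySem.List.pyGet? (a :: t) ((k : Int) + 3) = PySem.List.pyGet? t ((k : Int) + 2) := by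
    rw [show ((k : Int) + 3) = ((k + 3 : Nat) : Int) by push_cast; ring,
      show ((k : Int) + 2) = ((k + 2 : Nat) : Int) by push_cast; ring,
      PySem.List.pyGet?_natCast, PySem.List.pyGet?_natCast,
      show k + 3 = (k + 2) + 1 from rfl, List.getElem?_cons_succ]
  simp only [goodB,
    show ((k : Int) + 1 + 1) = ((k : Int) + 2) by ring,
    show ((k : Int) + 1 + 2) = ((k : Int) + 3) by ring, g0, g1, g2]

lemma wOf_shift (a : Char) (t : List Char) (k : Nat) :
    wOf (a :: t) ((k : Int) + 1) = wOf t (k : Int) := by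
  simp only [wOf]
  rw [show ((k : Int) + 1 + 3) = ((k + 4 : Nat) : Int) by push_cast; ring,
    show ((k : Int) + 1) = ((k + 1 : Nat) : Int) by push_cast; ring,
    PySem.List.slice_natCast,
    show ((k : Int) + 3) = ((k + 3 : Nat) : Int) by push_cast; ring,
    show ((k : Int)) = ((k : Nat) : Int) from rfl, PySem.List.slice_natCast]
  rw [show k + 4 - (k + 1) = 3 from by omega, show k + 3 - k = 3 from by omega,
    List.drop_succ_cons]

lemma winsRec_cons (a : Char) (t : List Char) :
    winsRec (a :: t)
      = (if goodB (a :: t) 0 then [wOf (a :: t) 0] else []) ++ winsRec t := by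
  match t with
  | [] =>
      have h2 : PySem.List.pyGet? [a] ((0 : Int) + 2) = none := by
        rw [show ((0 : Int) + 2) = ((2 : Nat) : Int) by norm_num, PySem.List.pyGet?_natCast]
        rfl
      have h1 : PySem.List.pyGet? [a] ((0 : Int) + 1) = none := by
        rw [show ((0 : Int) + 1) = ((1 : Nat) : Int) by norm_num, PySem.List.pyGet?_natCast]
        rfl
      have : goodB [a] 0 = false := by
        simp only [goodB, h1, h2]
        rcases PySem.List.pyGet? [a] 0 with _ | x <;> rfl
      simp [winsRec, this]
  | [b] =>
      have h2 : PySem.List.pyGet? [a, b] ((0 : Int) + 2) = none := by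
        rw [show ((0 : Int) + 2) = ((2 : Nat) : Int) by norm_num, PySem.List.pyGet?_natCast]
        rfl
      have : goodB [a, b] 0 = false := by
        simp only [goodB, h2]
        rcases PySem.List.pyGet? [a, b] 0 with _ | x <;>
          rcases PySem.List.pyGet? [a, b] ((0 : Int) + 1) with _ | y <;> rfl
      simp [winsRec, this]
  | b :: c :: r =>
      have e0 : PySem.List.pyGet? (a :: b :: c :: r) (0 : Int) = some a := by
        rw [show (0 : Int) = ((0 : Nat) : Int) from rfl, PySem.List.pyGet?_natCast]; rfl
      have e1 : PySem.List.pyGet? (a :: b :: c :: r) ((0 : Int) + 1) = some b := by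
        rw [show ((0 : Int) + 1) = ((1 : Nat) : Int) by norm_num, PySem.List.pyGet?_natCast]; rfl
      have e2 : PySem.List.pyGet? (a :: b :: c :: r) ((0 : Int) + 2) = some c := by
        rw [show ((0 : Int) + 2) = ((2 : Nat) : Int) by norm_num, PySem.List.pyGet?_natCast]; rfl
      have hg : goodB (a :: b :: c :: r) 0 = (a != b && a == c) := by
        simp only [goodB, e0, e1, e2]
      have hw : wOf (a :: b :: c :: r) 0 = String.ofList [a, b, c] := by
        simp [wOf, pysem]
      rw [winsRec, hg, hw]
      by_cases h1 : a = b
      · simp [h1]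
      · by_cases h2 : a = c
        · subst h2; simp [h1]
        · simp [h1, h2]

lemma canon_eq_winsRec (l : List Char) :
    ((PySem.List.enumerate l 0).filter (fun q => goodB l q.1)).map (fun q => wOf l q.1)
      = winsRec l := by
  induction l with
  | nil => simp [PySem.List.enumerate_nil, winsRec]
  | cons a t ih =>
      rw [PySem.List.enumerate_cons, enum_shift, List.filter_cons, List.filter_map]
      have hfil : List.filter ((fun q => goodB (a :: t) q.1) ∘ (fun q : Int × Char => (q.1 + 1, q.2)))
            (PySem.List.enumerate t 0)
          = List.filter (fun q => goodB t q.1) (PySem.List.enumerate t 0) := by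
        apply List.filter_congr
        intro q hq
        obtain ⟨k, hk, rfl⟩ := (PySem.List.mem_enumerate_iff t 0 q).mp hq
        simp only [Function.comp]
        simpa using goodB_shift a t k
      have hmap : List.map (fun q => wOf (a :: t) q.1)
            (List.map (fun q : Int × Char => (q.1 + 1, q.2))
              (List.filter (fun q => goodB t q.1) (PySem.List.enumerate t 0)))
          = List.map (fun q => wOf t q.1)
            (List.filter (fun q => goodB t q.1) (PySem.List.enumerate t 0)) := by
        rw [List.map_map]
        apply List.map_congr_left
        intro q hq
        obtain ⟨k, hk, rfl⟩ := (PySem.List.mem_enumerate_iff t 0 q).mp (List.mem_of_mem_filter hq)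
        simp only [Function.comp]
        simpa using wOf_shift a t k
      rw [hfil]
      rw [winsRec_cons]
      by_cases hg : goodB (a :: t) ((0 : Int), a).1
      · rw [if_pos hg, List.map_cons, hmap, ih]
        have : goodB (a :: t) 0 = true := hg
        rw [this, if_pos rfl]
        rfl
      · rw [if_neg hg, hmap, ih]
        have : ¬ goodB (a :: t) 0 = true := hg
        rw [if_neg this, List.nil_append]

-- ---------- partition permutation (grouping by key) ----------
lemma perm_flatMap_filter {α κ : Type} [DecidableEq κ] (f : α → κ) :
    ∀ (ks : List κ) (xs : List α), ks.Nodup → (∀ a ∈ xs, f a ∈ ks) →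
      (ks.flatMap (fun k => xs.filter (fun a => f a == k))).Perm xs := by
  intro ks
  induction ks with
  | nil =>
      intro xs _ hcov
      have : xs = [] := by
        cases xs with
        | nil => rfl
        | cons x xs => exact absurd (hcov x (List.mem_cons_self)) (by simp)
      simp [this]
  | cons k ks ih =>
      intro xs hnd hcov
      rw [List.flatMap_cons]
      have hknotin : k ∉ ks := (List.nodup_cons.mp hnd).1
      have hkey : ∀ k' ∈ ks,
          xs.filter (fun a => f a == k')
            = (xs.filter (fun a => !(f a == k))).filter (fun a => f a == k') := by
        intro k' hk'
        rw [List.filter_filter]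
        apply List.filter_congr
        intro a _
        by_cases h : f a = k'
        · have : k' ≠ k := fun he => hknotin (he ▸ hk')
          simp [h, this]
        · simp [h]
      have hfm : ks.flatMap (fun k' => xs.filter (fun a => f a == k'))
          = ks.flatMap (fun k' => (xs.filter (fun a => !(f a == k))).filter (fun a => f a == k')) := by
        apply List.flatMap_congr
        intro k' hk'
        exact hkey k' hk'
      rw [hfm]
      have hperm := ih (xs.filter (fun a => !(f a == k))) (List.nodup_cons.mp hnd).2
        (by
          intro a ha
          have hmem := List.mem_of_mem_filter ha
          have hne : f a ≠ k := by
            have := List.of_mem_filter ha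
            simpa using this
          have := hcov a hmem
          simp only [List.mem_cons] at this
          exact this.resolve_left hne)
      exact (hperm.append_left (xs.filter (fun a => f a == k))).trans
        (by simpa using List.filter_append_perm (fun a => f a == k) xs)

-- ---------- B side reduction ----------
lemma mem_posOf (l : List Char) (c : Char) (x : Int) (hx : 0 ≤ x) :
    x ∈ ((PySem.List.enumerate l 0).filter (fun q => q.2 == c)).map (fun q => q.1)
      ↔ PySem.List.pyGet? l x = some c := by
  obtain ⟨m, rfl⟩ : ∃ m : Nat, x = (m : Int) := ⟨x.toNat, (Int.toNat_of_nonneg hx).symm⟩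
  rw [PySem.List.pyGet?_natCast]
  constructor
  · rintro hmem
    obtain ⟨q, hq, hq1⟩ := List.mem_map.mp hmem
    have hqe := List.mem_of_mem_filter hq
    have hqc : q.2 = c := by simpa using List.of_mem_filter hq
    obtain ⟨k, hk, rfl⟩ := (PySem.List.mem_enumerate_iff l 0 q).mp hqe
    simp only [zero_add] at hq1 hqc
    have : k = m := by exact_mod_cast hq1
    subst this
    rw [List.getElem?_eq_getElem hk, hqc]
  · intro hget
    obtain ⟨hm, hc⟩ := List.getElem?_eq_some_iff.mp hget
    apply List.mem_map.mpr
    refine ⟨((m : Int), c), ?_, rfl⟩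
    apply List.mem_filter.mpr
    refine ⟨(PySem.List.mem_enumerate_iff l 0 _).mpr ⟨m, hm, by simp [hc]⟩, by simp⟩

lemma filter_cond_eq_goodB (l : List Char) (c : Char) :
    (((PySem.List.enumerate l 0).filter (fun q => q.2 == c)).map (fun q => q.1)).filter
        (fun p => decide ((p + 2) ∈ PySem.Set.ofList
            (((PySem.List.enumerate l 0).filter (fun q => q.2 == c)).map (fun q => q.1))
          ∧ PySem.List.pyGet? l (p + 1) ≠ some c))
      = (((PySem.List.enumerate l 0).filter (fun q => q.2 == c)).map (fun q => q.1)).filter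
        (fun p => goodB l p) := by
  apply List.filter_congr
  intro p hp
  have hp0 : 0 ≤ p := by
    obtain ⟨q, hq, rfl⟩ := List.mem_map.mp hp
    obtain ⟨k, hk, rfl⟩ := (PySem.List.mem_enumerate_iff l 0 q).mp (List.mem_of_mem_filter hq)
    simp
  have hpc : PySem.List.pyGet? l p = some c := (mem_posOf l c p hp0).mp hp
  have hmem2 : ((p + 2) ∈ PySem.Set.ofList
        (((PySem.List.enumerate l 0).filter (fun q => q.2 == c)).map (fun q => q.1)))
      ↔ PySem.List.pyGet? l (p + 2) = some c := by
    rw [PySem.Set.mem_ofList]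
    exact mem_posOf l c (p + 2) (by omega)
  obtain ⟨m, rfl⟩ : ∃ m : Nat, p = (m : Int) := ⟨p.toNat, (Int.toNat_of_nonneg hp0).symm⟩
  rw [PySem.List.pyGet?_natCast] at hpc
  have hm : m < l.length := (List.getElem?_eq_some_iff.mp hpc).1
  by_cases h2 : PySem.List.pyGet? l ((m : Int) + 2) = some c
  · -- p+2 in range: middle char exists
    have h2n : ((m : Int) + 2) = ((m + 2 : Nat) : Int) := by push_cast; ring
    have h2' : l[m + 2]? = some c := by rw [← PySem.List.pyGet?_natCast, ← h2n]; exact h2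
    have hm2 : m + 2 < l.length := (List.getElem?_eq_some_iff.mp h2').1
    have hm1 : m + 1 < l.length := by omega
    have h1n : ((m : Int) + 1) = ((m + 1 : Nat) : Int) := by push_cast; ring
    have hb : PySem.List.pyGet? l ((m : Int) + 1) = some l[m + 1] := by
      rw [h1n, PySem.List.pyGet?_natCast, List.getElem?_eq_getElem hm1]
    have hcl2 : l[m + 2] = c := (List.getElem?_eq_some_iff.mp h2').2
    have hmem : ((m : Int) + 2) ∈ PySem.Set.ofList
        (((PySem.List.enumerate l 0).filter (fun q => q.2 == c)).map (fun q => q.1)) :=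
      hmem2.mpr h2
    simp only [goodB, hb, PySem.List.pyGet?_natCast, hpc]
    rw [show PySem.List.pyGet? l ((m : Int) + 2) = some l[m + 2] from by
      rw [h2n, PySem.List.pyGet?_natCast, List.getElem?_eq_getElem hm2]]
    rw [hcl2]
    by_cases hbc : l[m + 1] = c
    · simp [hbc, hmem]
    · simp [hbc, Ne.symm hbc, hmem]
  · -- p+2 not a position of c: both sides false
    have hleft : ¬ (((m : Int) + 2) ∈ PySem.Set.ofList
        (((PySem.List.enumerate l 0).filter (fun q => q.2 == c)).map (fun q => q.1))) := by
      rw [hmem2]; exact h2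
    have hgood : goodB l (m : Int) = false := by
      simp only [goodB, PySem.List.pyGet?_natCast, hpc]
      rcases h1 : PySem.List.pyGet? l ((m : Int) + 1) with _ | b
      · rfl
      · rcases h3 : PySem.List.pyGet? l ((m : Int) + 2) with _ | c'
        · rfl
        · have hcc : c ≠ c' := fun he => h2 (he ▸ h3)
          simp [hcc]
    simp [hleft, hgood]

lemma perString (l : List Char) :
    (let pos := (PySem.List.enumerate l 0).foldl
        (fun d q => d.modify q.2 [] (· ++ [q.1])) PySem.Dict.empty
     let hits := pos.items.foldl (fun h q =>
        let here := PySem.Set.ofList q.2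
        q.2.foldl (fun h' p =>
          if (p + 2) ∈ here ∧ PySem.List.pyGet? l (p + 1) ≠ some q.1
          then h' ++ [p] else h') h) []
     let shits := PySem.List.sorted hits (fun x => x) false
     shits.map (fun p => String.ofList (PySem.List.slice l (some p) (some (p + 3)))))
      = winsRec l := by
  have hnodup : ((PySem.List.enumerate l 0).foldl
      (fun d q => d.modify q.2 [] (· ++ [q.1])) PySem.Dict.empty).keys.Nodup :=
    PySem.Dict.nodup_keys_foldl_modify_key (PySem.List.enumerate l 0) (fun q => q.2) []
      (fun _ q => (· ++ [q.1])) PySem.Dict.empty PySem.Dict.nodup_keys_empty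
  have hkeys : ((PySem.List.enumerate l 0).foldl
      (fun d q => d.modify q.2 [] (· ++ [q.1])) PySem.Dict.empty).keys = PySem.Set.ofList l := by
    rw [PySem.Dict.keys_foldl_modify_key (PySem.List.enumerate l 0) (fun q => q.2) []
      (fun _ q => (· ++ [q.1])) PySem.Dict.empty]
    rw [PySem.List.map_snd_enumerate, PySem.Dict.keys_empty]
    rfl
  have hgetD : ∀ c, ((PySem.List.enumerate l 0).foldl
      (fun d q => d.modify q.2 [] (· ++ [q.1])) PySem.Dict.empty).getD c []
        = ((PySem.List.enumerate l 0).filter (fun q => q.2 == c)).map (fun q => q.1) := by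
    intro c
    rw [show ((PySem.List.enumerate l 0).foldl
        (fun d q => d.modify q.2 [] (· ++ [q.1])) PySem.Dict.empty)
      = (((PySem.List.enumerate l 0).map (fun q => (q.2, q.1))).foldl
        (fun d p => d.modify p.1 [] (· ++ [p.2])) PySem.Dict.empty) from by
      rw [List.foldl_map]]
    rw [PySem.Dict.getD_foldl_modify_append]
    simp [PySem.Dict.getD_empty, List.filter_map, List.map_map, Function.comp_def]
  have hitems := PySem.Dict.items_eq_map_keys _ hnodup ([] : List Int)
  rw [hkeys] at hitems
  simp only []
  rw [hitems]
  -- hits loop: inner fold appends the filtered positions, outer fold is a flatMap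
  rw [PySem.List.foldl_congr_mem _
    (g := fun h q => h ++ q.2.filter (fun p => decide ((p + 2) ∈ PySem.Set.ofList q.2
        ∧ PySem.List.pyGet? l (p + 1) ≠ some q.1)))
    _ _
    (by
      intro acc q _
      exact PySem.List.foldl_append_ite_eq_filter _ q.2 acc)]
  rw [PySem.List.foldl_append_eq_flatMap, List.nil_append, List.flatMap_map]
  simp only [hgetD]
  -- pointwise: the membership condition is exactly goodB on members
  have hfil : ∀ c ∈ PySem.Set.ofList l,
      (((PySem.List.enumerate l 0).filter (fun q => q.2 == c)).map (fun q => q.1)).filter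
        (fun p => decide ((p + 2) ∈ PySem.Set.ofList
            (((PySem.List.enumerate l 0).filter (fun q => q.2 == c)).map (fun q => q.1))
          ∧ PySem.List.pyGet? l (p + 1) ≠ some c))
      = (((PySem.List.enumerate l 0).filter (fun q => goodB l q.1)).filter
          (fun q => q.2 == c)).map (fun q => q.1) := by
    intro c _
    rw [filter_cond_eq_goodB, List.filter_map, List.filter_filter]
    rw [List.filter_filter]
    congr 1
    apply List.filter_congr
    intro q _
    simp [Bool.and_comm]
  rw [List.flatMap_congr hfil]
  -- permutation with the canonical ascending list
  have hperm : (((PySem.List.enumerate l 0).filter (fun q => goodB l q.1)).map (fun q => q.1)).Perm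
      ((PySem.Set.ofList l).flatMap (fun c =>
        (((PySem.List.enumerate l 0).filter (fun q => goodB l q.1)).filter
          (fun q => q.2 == c)).map (fun q => q.1))) := by
    rw [← List.map_flatMap]
    apply List.Perm.map
    apply List.Perm.symm
    apply perm_flatMap_filter (fun q : Int × Char => q.2)
    · exact PySem.Set.nodup_ofList l
    · intro q hq
      obtain ⟨k, hk, rfl⟩ := (PySem.List.mem_enumerate_iff l 0 q).mp (List.mem_of_mem_filter hq)
      rw [PySem.Set.mem_ofList]
      exact List.getElem_mem hk
  have hpw : (((PySem.List.enumerate l 0).filter (fun q => goodB l q.1)).map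
      (fun q => q.1)).Pairwise (fun a b => a < b) := by
    rw [List.pairwise_map]
    exact (PySem.List.pairwise_lt_enumerate l 0).filter _
  rw [PySem.List.sorted_eq_of_perm_of_pairwise_lt _ _ _ hperm hpw]
  rw [List.map_map]
  exact canon_eq_winsRec l

lemma outerA (ips : List String) (acc : List String) :
    ips.foldl (fun x ip =>
        (PySem.List.pyRange 0 ((ip.toList.length : Int) - 2) 1).foldl (getAbasBodyA ip.toList) x) acc
      = acc ++ ips.flatMap (fun ip => winsRec ip.toList) := by
  induction ips generalizing acc with
  | nil => simp
  | cons ip rest ih =>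
      simp only [List.foldl_cons, List.flatMap_cons]
      rw [foldA, ih, List.append_assoc]

lemma outerB (ips : List String) (acc : List String) :
    ips.foldl (fun out ip =>
      let lc := ip.toList
      let pos := (PySem.List.enumerate lc 0).foldl
        (fun d q => d.modify q.2 [] (· ++ [q.1])) PySem.Dict.empty
      let hits := pos.items.foldl (fun h q =>
        let here := PySem.Set.ofList q.2
        q.2.foldl (fun h' p =>
          if (p + 2) ∈ here ∧ PySem.List.pyGet? lc (p + 1) ≠ some q.1
          then h' ++ [p] else h') h) []
      let shits := PySem.List.sorted hits (fun x => x) false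
      out ++ shits.map (fun p => String.ofList (PySem.List.slice lc (some p) (some (p + 3))))) acc
      = acc ++ ips.flatMap (fun ip => winsRec ip.toList) := by
  induction ips generalizing acc with
  | nil => simp
  | cons ip rest ih =>
      simp only [List.foldl_cons, List.flatMap_cons]
      rw [ih, ← List.append_assoc]
      congr 2
      exact perString ip.toList

-- ===== VERDICT (by name: the statement is the Claim_ definition above) =====
theorem get_abas_spec : Claim_equal_get_abas := by
  intro ips _
  show get_abas ips = get_abas_alt ips
  rw [get_abas, get_abas_alt, outerA, outerB]
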